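-- pv_equiv track=rewrite | github.com/PineappleW3/PokemonBattleTowerHelper | Super Data/SaveProject2.py | eraser
-- ===== SOURCE A (Python) =====
-- def eraser(vari):
--     vari = [*vari]
--     removing = False
--     new2 = ""
--     for i in vari:
--         if removing == False:
--             if i == "<" or i == "&":
--                 removing = True
--             else:
--                 new2 = new2 + i
--         elif removing == True:
--             if i == ">":
--                 removing = False
--     vari = new2.strip()
--     return vari
-- ===== SOURCE B (Python) =====
-- def eraser(vari):
--     out = []
--     i, n = 0, len(vari)
--     while i < n:
--         c = vari[i]
--         if c == "<" or c == "&":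
--             p = vari.find(">", i + 1)
--             if p == -1:
--                 break
--             i = p + 1
--         else:
--             out.append(c)
--             i += 1
--     return "".join(out).strip()
-- ===== Notes on version B (the rewrite author's own statement) =====
-- stated objective: alternative
-- what changed: Replaces the char-by-char removing-flag state machine with a recursion that copies plain text and, on each '<' or '&', skips the whole tag at once using str.find('>') (unterminated tag drops the remainder), then strips.
import Mathlib
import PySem

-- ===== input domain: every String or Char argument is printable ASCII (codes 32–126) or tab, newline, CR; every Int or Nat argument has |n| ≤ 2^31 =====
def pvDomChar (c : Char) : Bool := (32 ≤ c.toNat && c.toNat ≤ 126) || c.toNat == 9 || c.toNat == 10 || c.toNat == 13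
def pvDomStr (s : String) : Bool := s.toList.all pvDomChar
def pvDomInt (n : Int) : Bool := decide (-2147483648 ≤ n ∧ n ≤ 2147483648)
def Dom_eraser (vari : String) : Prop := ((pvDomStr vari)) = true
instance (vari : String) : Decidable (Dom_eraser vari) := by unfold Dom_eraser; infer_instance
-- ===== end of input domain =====

-- B replaces A's char-by-char removing-flag state machine by an index loop that copies text
-- and, at each '<'/'&', jumps past the whole tag at once with str.find(">", i+1) (objective: alternative).

-- ===== PORT A =====
-- one step of A's for-loop over (removing, new2)
def eraserStep (st : Bool × List Char) (i : Char) : Bool × List Char :=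
  if st.1 = false then
    if i = '<' ∨ i = '&' then (true, st.2) else (st.1, st.2 ++ [i])
  else
    if i = '>' then (false, st.2) else st

def eraser (vari : String) : String :=
  PySem.Str.strip (String.ofList (vari.toList.foldl eraserStep (false, [])).2)

-- ===== PORT B =====
-- B's while-loop: i is the cursor, out the copied text; at an opener, p = vari.find(">", i+1);
-- break (return out) if p = -1, else continue at p+1.
def eraserAltGo (vari : List Char) (i : Nat) (out : List Char) : List Char :=
  if h : i < vari.length then
    let c := vari[i]
    if c = '<' ∨ c = '&' then
      let p := PySem.Chars.findFrom vari ['>'] ((i : Int) + 1) none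
      if p = -1 then out
      else eraserAltGo vari (p.toNat + 1) out
    else eraserAltGo vari (i + 1) (out ++ [c])
  else out
termination_by vari.length - i
decreasing_by
  · rename_i hp
    have hk : i + 1 ≤ vari.length := h
    have hf := PySem.Chars.findFrom_natCast vari ['>'] (i + 1) hk
    push_cast at hf
    have h0 := PySem.Chars.neg_one_le_find (s := vari.drop (i + 1)) (sub := ['>'])
    have hp' : ¬ PySem.Chars.findFrom vari ['>'] ((i : Int) + 1) none = -1 := hp
    show vari.length - ((PySem.Chars.findFrom vari ['>'] ((i : Int) + 1) none).toNat + 1)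
        < vari.length - i
    rw [hf] at hp' ⊢
    by_cases hc : PySem.Chars.find (vari.drop (i + 1)) ['>'] = -1
    · simp [hc] at hp'
    · rw [if_neg hc] at hp' ⊢
      omega
  · omega

def eraser_alt (vari : String) : String :=
  PySem.Str.strip (String.ofList (eraserAltGo vari.toList 0 []))

-- ===== PRECONDITION & SPEC =====
def Spec_eraser (vari : String) (out : String) : Prop := out = eraser_alt vari
instance (vari : String) (out : String) : Decidable (Spec_eraser vari out) := by unfold Spec_eraser; infer_instance

-- ===== CLAIM (what is proved, stated in full; the proofs are below) =====
def Claim_equal_eraser : Prop := ∀ (vari : String), Dom_eraser vari → Spec_eraser vari (eraser vari)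

-- ===== LEMMAS AND PROOFS =====

theorem singleton_prefix_iff {α : Type} (d : α) (t : List α) :
    [d] <+: t ↔ ∃ t', t = d :: t' := by
  constructor
  · rintro ⟨u, rfl⟩
    exact ⟨u, rfl⟩
  · rintro ⟨t', rfl⟩
    exact ⟨t', rfl⟩

theorem singleton_infix_iff_mem {α : Type} (d : α) (t : List α) :
    [d] <:+: t ↔ d ∈ t := by
  constructor
  · intro h
    exact (List.singleton_sublist).1 h.sublist
  · intro h
    obtain ⟨u, v, huv⟩ := List.append_of_mem h
    exact ⟨u, v, by simp [huv]⟩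

theorem find_singleton_cons (c d : Char) (s : List Char) :
    PySem.Chars.find (c :: s) [d] =
      if c = d then 0
      else if PySem.Chars.find s [d] = -1 then -1
      else PySem.Chars.find s [d] + 1 := by
  by_cases hc : c = d
  · subst hc
    have hin : [c] <:+: (c :: s) := (singleton_infix_iff_mem c _).2 (by simp)
    have h0 : 0 ≤ PySem.Chars.find (c :: s) [c] := (PySem.Chars.find_nonneg_iff _ _).2 hin
    rw [if_pos rfl]
    obtain ⟨hpre, hmin⟩ := PySem.Chars.find_spec (s := c :: s) (sub := [c]) h0
    by_contra hne
    have hFpos : 0 < (PySem.Chars.find (c :: s) [c]).toNat := by omega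
    exact (hmin 0 hFpos) ((singleton_prefix_iff c _).2 ⟨s, rfl⟩)
  · simp only [if_neg hc]
    by_cases hrest : PySem.Chars.find s [d] = -1
    · rw [if_pos hrest]
      have hnot : ¬ [d] <:+: s := (PySem.Chars.find_eq_neg_one_iff _ _).1 hrest
      refine (PySem.Chars.find_eq_neg_one_iff _ _).2 ?_
      intro h
      rcases List.mem_cons.1 ((singleton_infix_iff_mem d _).1 h) with h | h
      · exact hc h.symm
      · exact hnot ((singleton_infix_iff_mem d _).2 h)
    · rw [if_neg hrest]
      have h0 : 0 ≤ PySem.Chars.find s [d] := by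
        have := PySem.Chars.neg_one_le_find (s := s) (sub := [d])
        omega
      set k := (PySem.Chars.find s [d]).toNat with hk
      obtain ⟨hpre, hmin⟩ := PySem.Chars.find_spec (s := s) (sub := [d]) h0
      have hmem : d ∈ s := by
        rcases (singleton_prefix_iff d _).1 hpre with ⟨t', ht'⟩
        have : d ∈ s.drop k := ht' ▸ List.mem_cons_self
        exact List.mem_of_mem_drop this
      have hF0 : 0 ≤ PySem.Chars.find (c :: s) [d] :=
        (PySem.Chars.find_nonneg_iff _ _).2 ((singleton_infix_iff_mem d _).2 (by simp [hmem]))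
      obtain ⟨hpreF, hminF⟩ := PySem.Chars.find_spec (s := c :: s) (sub := [d]) hF0
      set F := (PySem.Chars.find (c :: s) [d]).toNat with hFdef
      have hFne : F ≠ 0 := by
        intro h
        rcases (singleton_prefix_iff d _).1 (h ▸ hpreF) with ⟨t', ht'⟩
        exact hc (by simpa using congrArg List.head? ht')
      obtain ⟨m, hm⟩ : ∃ m, F = m + 1 := ⟨F - 1, by omega⟩
      have hpm : [d] <+: s.drop m := by
        have := hpreF
        rw [hm] at this
        simpa using this
      have hkm : k ≤ m := by
        by_contra h
        exact hmin m (by omega) hpm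
      have hFk : F ≤ k + 1 := by
        by_contra h
        exact hminF (k + 1) (by omega) (by simpa using hpre)
      omega

theorem find_nil_gt : PySem.Chars.find ([] : List Char) ['>'] = -1 := by
  refine (PySem.Chars.find_eq_neg_one_iff _ _).2 ?_
  intro h
  simpa using (singleton_infix_iff_mem '>' []).1 h

-- what B does when A's flag is on and the scan resumes at index j: skip to past the next '>'
def skipFrom (vari : List Char) (j : Nat) (out : List Char) : List Char :=
  if PySem.Chars.findFrom vari ['>'] (j : Int) none = -1 then out
  else eraserAltGo vari ((PySem.Chars.findFrom vari ['>'] (j : Int) none).toNat + 1) out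

theorem go_at_lt (vari : List Char) (i : Nat) (out : List Char) (h : i < vari.length) :
    eraserAltGo vari i out =
      if vari[i] = '<' ∨ vari[i] = '&' then skipFrom vari (i + 1) out
      else eraserAltGo vari (i + 1) (out ++ [vari[i]]) := by
  conv_lhs => rw [eraserAltGo]
  rw [dif_pos h, skipFrom]
  push_cast
  rfl

theorem go_at_ge (vari : List Char) (i : Nat) (out : List Char) (h : ¬ i < vari.length) :
    eraserAltGo vari i out = out := by
  rw [eraserAltGo, dif_neg h]

theorem skipFrom_at_len (vari : List Char) (out : List Char) :
    skipFrom vari vari.length out = out := by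
  rw [skipFrom]
  have hff : PySem.Chars.findFrom vari ['>'] (vari.length : Int) none = -1 := by
    rw [PySem.Chars.findFrom_natCast vari ['>'] vari.length le_rfl, List.drop_length, find_nil_gt]
    simp
  rw [if_pos hff]

-- the main loop invariant: A's fold over the tail from i, from either flag state, against B
theorem main_inv (vari : List Char) : ∀ m i, vari.length - i ≤ m → i ≤ vari.length →
    ∀ acc : List Char,
    (List.foldl eraserStep (false, acc) (vari.drop i)).2 = eraserAltGo vari i acc ∧
    (List.foldl eraserStep (true, acc) (vari.drop i)).2 = skipFrom vari i acc := by
  intro m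
  induction m with
  | zero =>
    intro i hm hi acc
    have hlen : i = vari.length := by omega
    subst hlen
    rw [List.drop_length, go_at_ge vari _ acc (by omega), skipFrom_at_len]
    exact ⟨rfl, rfl⟩
  | succ m ih =>
    intro i hm hi acc
    by_cases h : i < vari.length
    · have hdrop : vari.drop i = vari[i] :: vari.drop (i + 1) := List.drop_eq_getElem_cons h
      have hfind : PySem.Chars.find (vari.drop i) ['>'] =
          if vari[i] = '>' then 0
          else if PySem.Chars.find (vari.drop (i+1)) ['>'] = -1 then -1
          else PySem.Chars.find (vari.drop (i+1)) ['>'] + 1 := by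
        rw [hdrop, find_singleton_cons]
      have hffi : PySem.Chars.findFrom vari ['>'] (i : Int) none =
          if PySem.Chars.find (vari.drop i) ['>'] = -1 then -1
          else (i : Int) + PySem.Chars.find (vari.drop i) ['>'] :=
        PySem.Chars.findFrom_natCast vari ['>'] i (by omega)
      constructor
      · -- removing = False
        rw [hdrop, List.foldl_cons, go_at_lt vari i acc h]
        by_cases hop : vari[i] = '<' ∨ vari[i] = '&'
        · have hstep : eraserStep (false, acc) vari[i] = (true, acc) := by
            simp [eraserStep, hop]
          rw [hstep, (ih (i+1) (by omega) (by omega) acc).2, if_pos hop]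
        · have hstep : eraserStep (false, acc) vari[i] = (false, acc ++ [vari[i]]) := by
            simp [eraserStep, hop]
          rw [hstep, (ih (i+1) (by omega) (by omega) (acc ++ [vari[i]])).1, if_neg hop]
      · -- removing = True; the scan for '>' starts at i
        rw [hdrop, List.foldl_cons]
        by_cases hcl : vari[i] = '>'
        · have hstep : eraserStep (true, acc) vari[i] = (false, acc) := by
            simp [eraserStep, hcl]
          rw [hstep, (ih (i+1) (by omega) (by omega) acc).1]
          rw [skipFrom, hffi, hfind, if_pos hcl]
          have h1 : (if (0 : Int) = -1 then (-1 : Int) else (i : Int) + 0) = (i : Int) := by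
            norm_num
          rw [h1, if_neg (show ¬ ((i : Int) = -1) by omega)]
          have h2 : ((i : Int)).toNat + 1 = i + 1 := by omega
          rw [h2]
        · have hstep : eraserStep (true, acc) vari[i] = (true, acc) := by
            simp [eraserStep, hcl]
          rw [hstep, (ih (i+1) (by omega) (by omega) acc).2]
          rw [skipFrom, skipFrom, hffi, hfind, if_neg hcl]
          have hffi1 : PySem.Chars.findFrom vari ['>'] (((i : Nat) + 1 : Nat) : Int) none =
              if PySem.Chars.find (vari.drop (i+1)) ['>'] = -1 then -1
              else (((i : Nat) + 1 : Nat) : Int) + PySem.Chars.find (vari.drop (i+1)) ['>'] :=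
            PySem.Chars.findFrom_natCast vari ['>'] (i+1) (by omega)
          rw [hffi1]
          by_cases hr : PySem.Chars.find (vari.drop (i+1)) ['>'] = -1
          · simp [hr]
          · have h0 : 0 ≤ PySem.Chars.find (vari.drop (i+1)) ['>'] := by
              have := PySem.Chars.neg_one_le_find (s := vari.drop (i+1)) (sub := ['>'])
              omega
            simp only [if_neg hr]
            have hne1 : ¬ (PySem.Chars.find (vari.drop (i+1)) ['>'] + 1 = -1) := by omega
            simp only [if_neg hne1]
            have hne2 : ¬ ((i : Int) + (PySem.Chars.find (vari.drop (i+1)) ['>'] + 1) = -1) := by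
              omega
            have hne3 : ¬ ((((i : Nat) + 1 : Nat) : Int) +
                PySem.Chars.find (vari.drop (i+1)) ['>'] = -1) := by
              push_cast
              omega
            rw [if_neg hne2, if_neg hne3]
            have harg : ((((i : Nat) + 1 : Nat) : Int) +
                  PySem.Chars.find (vari.drop (i+1)) ['>']).toNat + 1
                = ((i : Int) + (PySem.Chars.find (vari.drop (i+1)) ['>'] + 1)).toNat + 1 := by
              push_cast
              omega
            rw [harg]
    · have hlen : i = vari.length := by omega
      subst hlen
      rw [List.drop_length, go_at_ge vari _ acc (by omega), skipFrom_at_len]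
      exact ⟨rfl, rfl⟩

-- ===== VERDICT (by name: the statement is the Claim_ definition above) =====
theorem eraser_spec : Claim_equal_eraser := by
  intro vari _
  unfold Spec_eraser eraser eraser_alt
  have := (main_inv vari.toList vari.toList.length 0 (by omega) (by omega) []).1
  rw [List.drop_zero] at this
  rw [this]
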